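-- pv_equiv track=rewrite | github.com/rwth-i6/i6_experiments | users/raissi/setups/common/analysis/frame_statistics.py | count_cart_lengths
-- ===== SOURCE A (Python) =====
-- def count_cart_lengths(count, silence_symbol):
--     cart_lengths = []
--     hmm0_lengths = []
--     hmm1_lengths = []
--     hmm2_lengths = []
--     for label, length in count:
--         if label[0].strip().find(silence_symbol) == 0:
--             continue
--         cart_lengths.append(length)
--         if label[1] == 0:
--             hmm0_lengths.append(length)
--         if label[1] == 1:
--             hmm1_lengths.append(length)
--         if label[1] == 2:
--             hmm2_lengths.append(length)
--     return cart_lengths, hmm0_lengths, hmm1_lengths, hmm2_lengths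
-- ===== SOURCE B (Python) =====
-- def count_cart_lengths(count, silence_symbol):
--     survivors = [(label, length) for label, length in count
--                  if label[0].strip().find(silence_symbol) != 0]
--     cart_lengths = [length for _, length in survivors]
--     hmm0_lengths = [length for label, length in survivors if label[1] == 0]
--     hmm1_lengths = [length for label, length in survivors if label[1] == 1]
--     hmm2_lengths = [length for label, length in survivors if label[1] == 2]
--     return cart_lengths, hmm0_lengths, hmm1_lengths, hmm2_lengths
-- ===== Notes on version B (the rewrite author's own statement) =====
-- stated objective: simpler
-- what changed: Replaces the single loop with four conditional appends by a one-shot filter of survivors followed by four independent comprehensions (map/filter) deriving each output list.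
import Mathlib
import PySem

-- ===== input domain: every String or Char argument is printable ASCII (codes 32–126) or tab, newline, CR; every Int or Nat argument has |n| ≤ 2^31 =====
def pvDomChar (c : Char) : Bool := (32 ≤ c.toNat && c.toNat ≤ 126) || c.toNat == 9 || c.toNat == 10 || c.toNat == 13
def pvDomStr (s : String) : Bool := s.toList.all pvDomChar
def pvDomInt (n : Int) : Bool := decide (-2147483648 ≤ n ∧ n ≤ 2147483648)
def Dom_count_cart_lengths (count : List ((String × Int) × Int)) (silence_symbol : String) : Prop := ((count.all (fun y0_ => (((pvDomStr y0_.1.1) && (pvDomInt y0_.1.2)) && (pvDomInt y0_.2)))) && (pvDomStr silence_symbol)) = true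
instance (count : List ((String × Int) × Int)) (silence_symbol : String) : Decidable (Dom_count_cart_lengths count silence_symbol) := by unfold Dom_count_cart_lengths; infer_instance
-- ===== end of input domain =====

-- B replaces A's single loop (four conditional appends) by a one-shot filter of
-- survivors plus four independent map/filter passes; objective: simpler.

-- ===== PORT A =====
-- loop body of A: one iteration updating the four accumulator lists
def cclStep (silence_symbol : String) (st : List Int × List Int × List Int × List Int)
    (p : (String × Int) × Int) : List Int × List Int × List Int × List Int :=
  if PySem.Str.find (PySem.Str.strip p.1.1) silence_symbol == 0 then st
  else
    (st.1 ++ [p.2],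
     st.2.1 ++ (if p.1.2 == 0 then [p.2] else []),
     st.2.2.1 ++ (if p.1.2 == 1 then [p.2] else []),
     st.2.2.2 ++ (if p.1.2 == 2 then [p.2] else []))

def count_cart_lengths (count : List ((String × Int) × Int)) (silence_symbol : String) : List Int × List Int × List Int × List Int :=
  count.foldl (cclStep silence_symbol) ([], [], [], [])

-- ===== PORT B =====
def count_cart_lengths_alt (count : List ((String × Int) × Int)) (silence_symbol : String) : List Int × List Int × List Int × List Int :=
  let survivors := count.filter (fun p => !(PySem.Str.find (PySem.Str.strip p.1.1) silence_symbol == 0))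
  (survivors.map (fun p => p.2),
   (survivors.filter (fun p => p.1.2 == 0)).map (fun p => p.2),
   (survivors.filter (fun p => p.1.2 == 1)).map (fun p => p.2),
   (survivors.filter (fun p => p.1.2 == 2)).map (fun p => p.2))

-- ===== PRECONDITION & SPEC =====
def Spec_count_cart_lengths (count : List ((String × Int) × Int)) (silence_symbol : String) (out : List Int × List Int × List Int × List Int) : Prop := out = count_cart_lengths_alt count silence_symbol
instance (count : List ((String × Int) × Int)) (silence_symbol : String) (out : List Int × List Int × List Int × List Int) : Decidable (Spec_count_cart_lengths count silence_symbol out) := by unfold Spec_count_cart_lengths; infer_instance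

-- ===== CLAIM (what is proved, stated in full; the proofs are below) =====
def Claim_equal_count_cart_lengths : Prop := ∀ (count : List ((String × Int) × Int)) (silence_symbol : String), Dom_count_cart_lengths count silence_symbol → Spec_count_cart_lengths count silence_symbol (count_cart_lengths count silence_symbol)

-- ===== LEMMAS AND PROOFS =====
theorem ccl_loop_eq (silence_symbol : String) (count : List ((String × Int) × Int))
    (c h0 h1 h2 : List Int) :
    count.foldl (cclStep silence_symbol) (c, h0, h1, h2) =
      (c ++ (count_cart_lengths_alt count silence_symbol).1,
       h0 ++ (count_cart_lengths_alt count silence_symbol).2.1,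
       h1 ++ (count_cart_lengths_alt count silence_symbol).2.2.1,
       h2 ++ (count_cart_lengths_alt count silence_symbol).2.2.2) := by
  induction count generalizing c h0 h1 h2 with
  | nil => simp [count_cart_lengths_alt]
  | cons p rest ih =>
    simp only [List.foldl_cons, cclStep, count_cart_lengths_alt, List.filter_cons,
      List.map_cons, beq_iff_eq, Bool.not_eq_eq_eq_not, Bool.not_true, decide_eq_false_iff_not]
    split_ifs with hs <;>
      simp_all [count_cart_lengths_alt, List.filter_cons, apply_ite] <;>
      split_ifs <;> simp_all

-- ===== VERDICT (by name: the statement is the Claim_ definition above) =====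
theorem count_cart_lengths_spec : Claim_equal_count_cart_lengths := by
  intro count silence_symbol _
  unfold Spec_count_cart_lengths count_cart_lengths
  rw [ccl_loop_eq]
  simp
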